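-- pv_equiv track=rewrite | github.com/lawRossi/rewritter | rewritter/preprocess.py | get_semantic_role_groups
-- ===== SOURCE A (Python) =====
-- def longest_common_sequence(sequence1, sequence2):
--     dp = [[0] * (len(sequence2) + 1) for _ in range(len(sequence1) + 1)]
--     for i in range(1, len(sequence1) + 1):
--         for j in range(1, len(sequence2) + 1):
--             if sequence1[i-1] == sequence2[j-1]:
--                 dp[i][j] = dp[i-1][j-1] + 1
--             else:
--                 dp[i][j] = max(dp[i-1][j], dp[i][j-1])
--     i = len(sequence1)
--     j = len(sequence2)
--     common_sequence = []
--     while i > 0 and j > 0: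
--         if sequence1[i-1] == sequence2[j-1]:
--             common_sequence.append(sequence1[i-1])
--             i -= 1
--             j -= 1
--         elif dp[i][j-1] > dp[i-1][j]:
--             j -= 1
--         else:
--             i -= 1
--     common_sequence = common_sequence[::-1]
--     if isinstance(sequence1, str):
--         common_sequence = "".join(common_sequence)
--     return common_sequence
--
-- def find(text , query, pos=0):
--     i = pos
--     while i <= len(text) - len(query):
--         for j in range(len(query)):
--             if text[i+j] != query[j]:
--                 break
--         else:
--             return i
--         i += 1
--     return -1
--
-- def get_semantic_role_groups(source, target):
--     replaced = []
--     inserted = []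
--     common_sequence = longest_common_sequence(source, target)
--     replaced = list(range(len(source)))
--     offset = 0
--     for i, c in enumerate(source):
--         idx = find(common_sequence, [c], offset)
--         if idx != -1 and i >= idx:
--             replaced.remove(i)
--             offset = idx + 1
--
--     inserted = list(range(len(target)))
--     offset = 0
--     for i, c in enumerate(common_sequence):
--         idx = find(target, [c], offset)
--         if idx != -1 and len(target) - idx >= len(common_sequence) - i:
--             inserted.remove(idx)
--             offset = idx + 1
--     replaced_groups = group(replaced)
--     inserted_groups = group(inserted)
--     replacer = []
--     inserted_len = 0
--     shortened = 0
--     for i, inserted_group in enumerate(inserted_groups):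
--         for replaced_group in replaced_groups:
--             if inserted_group[0] - inserted_len == replaced_group[0] - shortened:
--                 replacer.append(i)
--                 shortened += len(replaced_group) - len(inserted_group)
--                 break
--         else:
--             inserted_len += len(inserted_group)
--     replacer_groups = [inserted_groups[i] for i in replacer]
--     inserted_groups = [inserted_groups[i] for i in range(len(inserted_groups)) if i not in replacer]
--     return replacer_groups, replaced_groups, inserted_groups
--
-- def group(elements):
--     groups = []
--     g = []
--     for i in range(len(elements)):
--         g.append(elements[i])
--         if i == len(elements) - 1 or elements[i] != elements[i+1] - 1:
--             groups.append(g)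
--             g = []
--     return groups
-- ===== SOURCE B (Python) =====
-- def longest_common_sequence(sequence1, sequence2):
--     dp = [[0] * (len(sequence2) + 1) for _ in range(len(sequence1) + 1)]
--     for i in range(1, len(sequence1) + 1):
--         for j in range(1, len(sequence2) + 1):
--             if sequence1[i-1] == sequence2[j-1]:
--                 dp[i][j] = dp[i-1][j-1] + 1
--             else:
--                 dp[i][j] = max(dp[i-1][j], dp[i][j-1])
--     i = len(sequence1)
--     j = len(sequence2)
--     common_sequence = []
--     while i > 0 and j > 0:
--         if sequence1[i-1] == sequence2[j-1]:
--             common_sequence.append(sequence1[i-1])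
--             i -= 1
--             j -= 1
--         elif dp[i][j-1] > dp[i-1][j]:
--             j -= 1
--         else:
--             i -= 1
--     common_sequence = common_sequence[::-1]
--     if isinstance(sequence1, str):
--         common_sequence = "".join(common_sequence)
--     return common_sequence
--
--
-- def group(elements):
--     groups = []
--     g = []
--     for i in range(len(elements)):
--         g.append(elements[i])
--         if i == len(elements) - 1 or elements[i] != elements[i+1] - 1:
--             groups.append(g)
--             g = []
--     return groups
--
--
-- def _positions(seq):
--     d = {}
--     for p, tok in enumerate(seq):
--         d.setdefault(tok, []).append(p)
--     return d
--
--
-- def _first_ge(positions, off):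
--     for p in positions:
--         if p >= off:
--             return p
--     return -1
--
--
-- def get_semantic_role_groups(source, target):
--     common_sequence = longest_common_sequence(source, target)
--
--     pos_in_common = _positions(common_sequence)
--     removed = set()
--     offset = 0
--     for i, c in enumerate(source):
--         idx = _first_ge(pos_in_common.get(c, []), offset)
--         if idx != -1 and i >= idx:
--             removed.add(i)
--             offset = idx + 1
--     replaced = [i for i in range(len(source)) if i not in removed]
--
--     pos_in_target = _positions(target)
--     removed_t = set()
--     offset = 0
--     for i, c in enumerate(common_sequence):
--         idx = _first_ge(pos_in_target.get(c, []), offset)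
--         if idx != -1 and len(target) - idx >= len(common_sequence) - i:
--             removed_t.add(idx)
--             offset = idx + 1
--     inserted = [j for j in range(len(target)) if j not in removed_t]
--
--     replaced_groups = group(replaced)
--     inserted_groups = group(inserted)
--     replacer = []
--     inserted_len = 0
--     shortened = 0
--     for i, inserted_group in enumerate(inserted_groups):
--         for replaced_group in replaced_groups:
--             if inserted_group[0] - inserted_len == replaced_group[0] - shortened:
--                 replacer.append(i)
--                 shortened += len(replaced_group) - len(inserted_group)
--                 break
--         else:
--             inserted_len += len(inserted_group)
--     replacer_groups = [inserted_groups[i] for i in replacer]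
--     inserted_groups = [inserted_groups[i] for i in range(len(inserted_groups)) if i not in replacer]
--     return replacer_groups, replaced_groups, inserted_groups
-- ===== Notes on version B (the rewrite author's own statement) =====
-- stated objective: alternative
-- what changed: The two greedy re-scans are re-decomposed: A's generic substring search `find` over the common sequence / target plus repeated O(n) `list.remove` calls are replaced by a token->positions index built once per sequence, a first-position->=offset lookup in that index, and a removed-index set whose complement is taken in a single final pass; the LCS DP and the group()/replacer-alignment tail are unchanged.
import Mathlib
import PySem

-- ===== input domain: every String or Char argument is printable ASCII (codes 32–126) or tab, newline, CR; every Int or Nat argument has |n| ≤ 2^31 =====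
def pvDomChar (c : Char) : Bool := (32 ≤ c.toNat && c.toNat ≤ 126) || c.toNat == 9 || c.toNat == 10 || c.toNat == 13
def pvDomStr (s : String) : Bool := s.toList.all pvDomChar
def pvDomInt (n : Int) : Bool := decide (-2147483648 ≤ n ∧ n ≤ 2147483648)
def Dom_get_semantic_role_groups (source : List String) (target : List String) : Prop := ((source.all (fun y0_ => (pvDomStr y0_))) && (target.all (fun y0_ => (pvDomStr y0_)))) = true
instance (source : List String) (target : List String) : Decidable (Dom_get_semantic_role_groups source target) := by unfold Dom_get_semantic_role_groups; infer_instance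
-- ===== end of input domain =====

-- B replaces A's generic substring search (`find`) plus repeated O(n) `list.remove` scans by a
-- token→positions index built once over the common sequence / target and a removed-index set whose
-- complement is taken in one pass; the LCS and the group/replacer tail are the identical Python in
-- both versions (objective: alternative decomposition, same greedy selection).

-- ===== PORT A =====
-- longest_common_sequence (identical Python code in A and in B: ported once, used by both ports)
def pvLcsRow (si : String) : List String → Int → List Int → Int → List Int
  | [], _, _, _ => []
  | _ :: _, _, [], _ => []
  | tok :: ts, diag, up :: rest, left =>
      let v := if si = tok then diag + 1 else max up left
      v :: pvLcsRow si ts up rest v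

def pvLcsRows (t : List String) : List String → List Int → List (List Int)
  | [], _ => []
  | si :: srest, prev =>
      let row := 0 :: pvLcsRow si t (prev.headD 0) prev.tail 0
      row :: pvLcsRows t srest row

def pvGet2 (dp : List (List Int)) (i j : Nat) : Int := (dp.getD i []).getD j 0

def pvLcsBack (s t : List String) (dp : List (List Int)) : Nat → Nat → List String → List String
  | i+1, j+1, acc =>
      if s.getD i "" = t.getD j "" then pvLcsBack s t dp i j (acc ++ [s.getD i ""])
      else if pvGet2 dp (i+1) j > pvGet2 dp i (j+1) then pvLcsBack s t dp (i+1) j acc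
      else pvLcsBack s t dp i (j+1) acc
  | 0, _, acc => acc
  | _+1, 0, acc => acc
  termination_by i j _ => i + j

def pvLCS (s t : List String) : List String :=
  let row0 : List Int := List.replicate (t.length + 1) 0
  let dp := row0 :: pvLcsRows t s row0
  (pvLcsBack s t dp s.length t.length []).reverse

-- group (identical Python code in A and in B: ported once, used by both ports)
def pvGroup (elements : List Int) : List (List Int) :=
  ((List.range elements.length).foldl (fun (st : List (List Int) × List Int) i =>
     let g := st.2 ++ [elements.getD i 0]
     if i = elements.length - 1 ∨ elements.getD i 0 ≠ elements.getD (i+1) 0 - 1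
     then (st.1 ++ [g], []) else (st.1, g)) ([], [])).1

-- the group()/replacer-alignment tail of get_semantic_role_groups (identical Python code in A and
-- in B from `replaced_groups = group(replaced)` on: ported once, used by both ports)
def pvFinish (replaced inserted : List Int) : List (List Int) × List (List Int) × List (List Int) :=
  let replaced_groups := pvGroup replaced
  let inserted_groups := pvGroup inserted
  let st := (PySem.List.enumerate inserted_groups 0).foldl
    (fun (st : List Int × Int × Int) p =>
      let (replacer, inserted_len, shortened) := st
      let (i, ig) := p
      match replaced_groups.find? (fun rg => ig.getD 0 0 - inserted_len == rg.getD 0 0 - shortened) with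
      | some rg => (replacer ++ [i], inserted_len, shortened + ((rg.length : Int) - (ig.length : Int)))
      | none => (replacer, inserted_len + (ig.length : Int), shortened)) ([], 0, 0)
  let replacer := st.1
  let replacer_groups := replacer.map (fun i => PySem.List.pyGetD inserted_groups i [])
  let inserted_groups' := ((PySem.List.pyRange 0 (inserted_groups.length) 1).filter
      (fun i => ¬ (i ∈ replacer))).map (fun i => PySem.List.pyGetD inserted_groups i [])
  (replacer_groups, replaced_groups, inserted_groups')

-- find (A only): inner for-else over the query, outer while over start positions
def pvMatchFrom (text : List String) : Nat → List String → Bool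
  | _, [] => true
  | k, q :: qs => if text.getD k "" ≠ q then false else pvMatchFrom text (k+1) qs

def pvFind (text query : List String) (i : Nat) : Int :=
  if h : i + query.length ≤ text.length then
    (if pvMatchFrom text i query then (i : Int) else pvFind text query (i+1))
  else -1
  termination_by text.length + 1 - i
  decreasing_by omega

def get_semantic_role_groups (source : List String) (target : List String) : List (List Int) × List (List Int) × List (List Int) :=
  let common := pvLCS source target
  let st1 := (PySem.List.enumerate source 0).foldl (fun (st : List Int × Int) p =>
      let (replaced, offset) := st
      let (i, c) := p
      let idx := pvFind common [c] offset.toNat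
      if idx ≠ -1 ∧ idx ≤ i then ((PySem.List.remove? replaced i).getD replaced, idx + 1)
      else (replaced, offset)) (PySem.List.pyRange 0 (source.length) 1, 0)
  let st2 := (PySem.List.enumerate common 0).foldl (fun (st : List Int × Int) p =>
      let (inserted, offset) := st
      let (i, c) := p
      let idx := pvFind target [c] offset.toNat
      if idx ≠ -1 ∧ (common.length : Int) - i ≤ (target.length : Int) - idx
      then ((PySem.List.remove? inserted idx).getD inserted, idx + 1)
      else (inserted, offset)) (PySem.List.pyRange 0 (target.length) 1, 0)
  pvFinish st1.1 st2.1

-- ===== PORT B =====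
-- _positions: token → list of its positions, built in one pass
def pvPositions (seq : List String) : PySem.Dict String (List Int) :=
  (PySem.List.enumerate seq 0).foldl (fun d p => d.modify p.2 [] (· ++ [p.1])) PySem.Dict.empty

-- _first_ge: first element ≥ off of a positions list
def pvFirstGE : List Int → Int → Int
  | [], _ => -1
  | p :: ps, off => if p ≥ off then p else pvFirstGE ps off

def get_semantic_role_groups_alt (source : List String) (target : List String) : List (List Int) × List (List Int) × List (List Int) :=
  let common := pvLCS source target
  let posC := pvPositions common
  let st1 := (PySem.List.enumerate source 0).foldl (fun (st : PySem.Set Int × Int) p =>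
      let (removed, offset) := st
      let (i, c) := p
      let idx := pvFirstGE (posC.getD c []) offset
      if idx ≠ -1 ∧ idx ≤ i then (PySem.Set.add removed i, idx + 1) else (removed, offset))
      (PySem.Set.empty, 0)
  let replaced := (PySem.List.pyRange 0 (source.length) 1).filter
      (fun j => ¬ (PySem.Set.contains st1.1 j))
  let posT := pvPositions target
  let st2 := (PySem.List.enumerate common 0).foldl (fun (st : PySem.Set Int × Int) p =>
      let (removedT, offset) := st
      let (i, c) := p
      let idx := pvFirstGE (posT.getD c []) offset
      if idx ≠ -1 ∧ (common.length : Int) - i ≤ (target.length : Int) - idx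
      then (PySem.Set.add removedT idx, idx + 1) else (removedT, offset)) (PySem.Set.empty, 0)
  let inserted := (PySem.List.pyRange 0 (target.length) 1).filter
      (fun j => ¬ (PySem.Set.contains st2.1 j))
  pvFinish replaced inserted

-- ===== PRECONDITION & SPEC =====
def Spec_get_semantic_role_groups (source : List String) (target : List String) (out : List (List Int) × List (List Int) × List (List Int)) : Prop := out = get_semantic_role_groups_alt source target
instance (source : List String) (target : List String) (out : List (List Int) × List (List Int) × List (List Int)) : Decidable (Spec_get_semantic_role_groups source target out) := by unfold Spec_get_semantic_role_groups; infer_instance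

-- ===== CLAIM (what is proved, stated in full; the proofs are below) =====
def Claim_equal_get_semantic_role_groups : Prop := ∀ (source : List String) (target : List String), Dom_get_semantic_role_groups source target → Spec_get_semantic_role_groups source target (get_semantic_role_groups source target)

-- ===== LEMMAS AND PROOFS =====

-- positions list of a token: the (increasing) list of its indices
def pvPosList (seq : List String) (c : String) : List Int :=
  ((PySem.List.enumerate seq 0).filter (fun q => q.2 == c)).map (·.1)

lemma pvPositions_getD (seq : List String) (c : String) :
    (pvPositions seq).getD c [] = pvPosList seq c := by
  unfold pvPositions pvPosList
  have h1 : (List.foldl (fun (d : PySem.Dict String (List Int)) (p : Int × String) =>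
        d.modify p.2 [] (· ++ [p.1])) PySem.Dict.empty (PySem.List.enumerate seq))
      = (((PySem.List.enumerate seq).map (fun (p : Int × String) => (p.2, p.1))).foldl
          (fun (d : PySem.Dict String (List Int)) (q : String × Int) =>
            d.modify q.1 [] (· ++ [q.2])) PySem.Dict.empty) :=
    (List.foldl_map (f := fun (p : Int × String) => (p.2, p.1))
      (g := fun (d : PySem.Dict String (List Int)) (q : String × Int) =>
        d.modify q.1 [] (· ++ [q.2]))).symm
  rw [h1, PySem.Dict.getD_foldl_modify_append]
  simp only [List.filter_map, List.map_map]
  rfl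

lemma mem_pvPosList (seq : List String) (c : String) (x : Int) :
    x ∈ pvPosList seq c ↔ ∃ k : Nat, k < seq.length ∧ x = (k : Int) ∧ seq.getD k "" = c := by
  unfold pvPosList
  simp only [List.mem_map, List.mem_filter, PySem.List.mem_enumerate_iff]
  constructor
  · rintro ⟨q, ⟨⟨k, hk, rfl⟩, hq⟩, rfl⟩
    refine ⟨k, hk, by simp, ?_⟩
    simpa [List.getD_eq_getElem?_getD, List.getElem?_eq_getElem hk] using (beq_iff_eq.1 hq)
  · rintro ⟨k, hk, rfl, he⟩
    refine ⟨((k : Int), seq[k]), ⟨⟨k, hk, by simp⟩, ?_⟩, by simp⟩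
    simp only [beq_iff_eq]
    simpa [List.getD_eq_getElem?_getD, List.getElem?_eq_getElem hk] using he

lemma pairwise_pvPosList (seq : List String) (c : String) :
    (pvPosList seq c).Pairwise (· < ·) := by
  unfold pvPosList
  exact ((PySem.List.pairwise_lt_enumerate seq 0).sublist List.filter_sublist).map _
    (fun _ _ h => h)

lemma pvFirstGE_eq_neg_one {l : List Int} {off : Int} (h : ∀ x ∈ l, x < off) :
    pvFirstGE l off = -1 := by
  induction l with
  | nil => rfl
  | cons p ps ih =>
      have hp : ¬ p ≥ off := by have := h p (by simp); omega
      simp only [pvFirstGE, hp, if_false]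
      exact ih (fun x hx => h x (by simp [hx]))

lemma pvFirstGE_mem {l : List Int} {off : Int} (h : pvFirstGE l off ≠ -1) :
    pvFirstGE l off ∈ l ∧ off ≤ pvFirstGE l off := by
  induction l with
  | nil => simp [pvFirstGE] at h
  | cons p ps ih =>
      by_cases hp : p ≥ off
      · simp only [pvFirstGE, if_pos hp]; exact ⟨by simp, hp⟩
      · simp only [pvFirstGE, if_neg hp] at h ⊢
        obtain ⟨h1, h2⟩ := ih h
        exact ⟨by simp [h1], h2⟩

lemma pvFirstGE_self {l : List Int} {off : Int} (hs : l.Pairwise (· < ·)) (hm : off ∈ l) :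
    pvFirstGE l off = off := by
  induction l with
  | nil => simp at hm
  | cons p ps ih =>
      rcases List.mem_cons.1 hm with h | h
      · simp [pvFirstGE, h.symm]
      · have hlt : p < off := (List.pairwise_cons.1 hs).1 _ h
        have hp : ¬ p ≥ off := by omega
        simp only [pvFirstGE, hp, if_false]
        exact ih (List.pairwise_cons.1 hs).2 h

lemma pvFirstGE_succ {l : List Int} {off : Int} (h : off ∉ l) :
    pvFirstGE l off = pvFirstGE l (off + 1) := by
  induction l with
  | nil => rfl
  | cons p ps ih =>
      have hne : p ≠ off := fun e => h (by simp [e])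
      by_cases hp : p ≥ off
      · have : p ≥ off + 1 := by omega
        simp [pvFirstGE, hp, this]
      · have : ¬ p ≥ off + 1 := by omega
        simp only [pvFirstGE, if_neg hp, if_neg this]
        exact ih (fun e => h (by simp [e]))

lemma pvFind_eq_firstGE (seq : List String) (c : String) (off : Nat) :
    pvFind seq [c] off = pvFirstGE (pvPosList seq c) (off : Int) := by
  suffices H : ∀ (n off : Nat), seq.length ≤ off + n →
      pvFind seq [c] off = pvFirstGE (pvPosList seq c) (off : Int) by
    exact H seq.length off (by omega)
  intro n
  induction n with
  | zero =>
      intro off hoff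
      rw [pvFind]
      rw [dif_neg (by simp; omega)]
      refine (pvFirstGE_eq_neg_one ?_).symm
      intro x hx
      obtain ⟨k, hk, rfl, -⟩ := (mem_pvPosList seq c x).1 hx
      omega
  | succ n ih =>
      intro off hoff
      rw [pvFind]
      by_cases hlt : off + 1 ≤ seq.length
      · rw [dif_pos (by simpa using hlt)]
        by_cases he : seq.getD off "" = c
        · have hmem : (off : Int) ∈ pvPosList seq c :=
            (mem_pvPosList seq c off).2 ⟨off, by omega, rfl, he⟩
          have he' : seq[off]?.getD "" = c := by simpa [List.getD_eq_getElem?_getD] using he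
          rw [if_pos (by simp [pvMatchFrom, he'])]
          exact (pvFirstGE_self (pairwise_pvPosList seq c) hmem).symm
        · have hnm : (off : Int) ∉ pvPosList seq c := by
            intro hx
            obtain ⟨k, hk, hke, hsk⟩ := (mem_pvPosList seq c _).1 hx
            have : k = off := by exact_mod_cast hke.symm
            exact he (this ▸ hsk)
          have he' : ¬ seq[off]?.getD "" = c := by simpa [List.getD_eq_getElem?_getD] using he
          rw [if_neg (by simp [pvMatchFrom, he'])]
          rw [ih (off + 1) (by omega)]
          rw [show ((off + 1 : Nat) : Int) = (off : Int) + 1 by push_cast; ring]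
          exact (pvFirstGE_succ hnm).symm
      · rw [dif_neg (by simpa using hlt)]
        refine (pvFirstGE_eq_neg_one ?_).symm
        intro x hx
        obtain ⟨k, hk, rfl, -⟩ := (mem_pvPosList seq c x).1 hx
        omega


-- one step of the two replaced-scans computes the same idx
lemma pvIdx_eq (common : List String) (c : String) (off : Int) (h : 0 ≤ off) :
    pvFind common [c] off.toNat = pvFirstGE ((pvPositions common).getD c []) off := by
  rw [pvPositions_getD, pvFind_eq_firstGE, Int.toNat_of_nonneg h]

lemma pvErase_filter (n : Int) (rem : List Int) (i0 : Int)
    (hnm : i0 ∉ rem) (hR : i0 ∈ PySem.List.pyRange 0 n 1) :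
    (PySem.List.remove? ((PySem.List.pyRange 0 n 1).filter
        (fun j => ¬ (PySem.Set.contains rem j))) i0).getD
      ((PySem.List.pyRange 0 n 1).filter (fun j => ¬ (PySem.Set.contains rem j)))
    = (PySem.List.pyRange 0 n 1).filter
        (fun j => ¬ (PySem.Set.contains (PySem.Set.add rem i0) j)) := by
  have hmem : i0 ∈ (PySem.List.pyRange 0 n 1).filter (fun j => ¬ (PySem.Set.contains rem j)) := by
    simp only [List.mem_filter]
    refine ⟨hR, ?_⟩
    simp [hnm]
  rw [PySem.List.remove?_eq_some_erase _ _ hmem]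
  simp only [Option.getD_some]
  have hnd : ((PySem.List.pyRange 0 n 1).filter (fun j => ¬ (PySem.Set.contains rem j))).Nodup :=
    (PySem.List.nodup_pyRange_one 0 n).filter _
  rw [hnd.erase_eq_filter i0, List.filter_filter]
  refine List.filter_congr ?_
  intro a _
  by_cases ha : a = i0 <;> by_cases hr : a ∈ rem <;>
    simp [ha, PySem.Set.mem_add, hr]

lemma pvScan1 (common : List String) (n : Int) (tl : List String) :
    ∀ (i0 : Int) (rep rem : List Int) (off : Int),
    rep = (PySem.List.pyRange 0 n 1).filter (fun j => ¬ (PySem.Set.contains rem j)) →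
    (∀ x ∈ rem, x < i0) →
    0 ≤ off → 0 ≤ i0 → i0 + tl.length ≤ n →
    (((PySem.List.enumerate tl i0).foldl (fun (st : List Int × Int) p =>
        let (replaced, offset) := st
        let (i, c) := p
        let idx := pvFind common [c] offset.toNat
        if idx ≠ -1 ∧ idx ≤ i then ((PySem.List.remove? replaced i).getD replaced, idx + 1)
        else (replaced, offset)) (rep, off)).1
      = (PySem.List.pyRange 0 n 1).filter (fun j => ¬ (PySem.Set.contains
          (((PySem.List.enumerate tl i0).foldl (fun (st : PySem.Set Int × Int) p =>
            let (removed, offset) := st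
            let (i, c) := p
            let idx := pvFirstGE ((pvPositions common).getD c []) offset
            if idx ≠ -1 ∧ idx ≤ i then (PySem.Set.add removed i, idx + 1)
            else (removed, offset)) (rem, off)).1) j))) := by
  induction tl with
  | nil =>
      intro i0 rep rem off hrep hlt hoff hi0 hlen
      simpa [PySem.List.enumerate_nil] using hrep
  | cons c tl ih =>
      intro i0 rep rem off hrep hlt hoff hi0 hlen
      rw [PySem.List.enumerate_cons, List.foldl_cons, List.foldl_cons]
      dsimp only
      rw [pvIdx_eq common c off hoff]
      by_cases hbr : pvFirstGE ((pvPositions common).getD c []) off ≠ -1 ∧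
          pvFirstGE ((pvPositions common).getD c []) off ≤ i0
      · simp only [if_pos hbr]
        rw [hrep]
        have hge : off ≤ pvFirstGE ((pvPositions common).getD c []) off :=
          (pvFirstGE_mem hbr.1).2
        rw [pvErase_filter n rem i0 (fun hm => absurd (hlt _ hm) (by omega))
            (by rw [PySem.List.mem_pyRange_one]; refine ⟨hi0, ?_⟩; simp at hlen; omega)]
        have hinv : ∀ x ∈ PySem.Set.add rem i0, x < i0 + 1 := by
          intro x hx
          rw [PySem.Set.mem_add] at hx
          rcases hx with h | h
          · exact lt_trans (hlt x h) (by omega)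
          · omega
        exact ih (i0 + 1) _ (PySem.Set.add rem i0) _ rfl hinv
          (by omega) (by omega) (by simp at hlen ⊢; omega)
      · simp only [if_neg hbr]
        exact ih (i0 + 1) rep rem off hrep
          (fun x hx => lt_trans (hlt x hx) (by omega)) hoff (by omega)
          (by simp at hlen ⊢; omega)


lemma pvScan2 (target : List String) (L : Int) (tl : List String) :
    ∀ (i0 : Int) (ins rem : List Int) (off : Int),
    ins = (PySem.List.pyRange 0 (target.length) 1).filter (fun j => ¬ (PySem.Set.contains rem j)) →
    (∀ x ∈ rem, x < off) →
    0 ≤ off →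
    (((PySem.List.enumerate tl i0).foldl (fun (st : List Int × Int) p =>
        let (inserted, offset) := st
        let (i, c) := p
        let idx := pvFind target [c] offset.toNat
        if idx ≠ -1 ∧ L - i ≤ (target.length : Int) - idx
        then ((PySem.List.remove? inserted idx).getD inserted, idx + 1)
        else (inserted, offset)) (ins, off)).1
      = (PySem.List.pyRange 0 (target.length) 1).filter (fun j => ¬ (PySem.Set.contains
          (((PySem.List.enumerate tl i0).foldl (fun (st : PySem.Set Int × Int) p =>
            let (removedT, offset) := st
            let (i, c) := p
            let idx := pvFirstGE ((pvPositions target).getD c []) offset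
            if idx ≠ -1 ∧ L - i ≤ (target.length : Int) - idx
            then (PySem.Set.add removedT idx, idx + 1)
            else (removedT, offset)) (rem, off)).1) j))) := by
  induction tl with
  | nil =>
      intro i0 ins rem off hins hlt hoff
      simpa [PySem.List.enumerate_nil] using hins
  | cons c tl ih =>
      intro i0 ins rem off hins hlt hoff
      rw [PySem.List.enumerate_cons, List.foldl_cons, List.foldl_cons]
      dsimp only
      rw [pvIdx_eq target c off hoff]
      by_cases hbr : pvFirstGE ((pvPositions target).getD c []) off ≠ -1 ∧
          L - i0 ≤ (target.length : Int) - pvFirstGE ((pvPositions target).getD c []) off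
      · simp only [if_pos hbr]
        rw [hins]
        have hge : off ≤ pvFirstGE ((pvPositions target).getD c []) off :=
          (pvFirstGE_mem hbr.1).2
        have hpl : pvFirstGE ((pvPositions target).getD c []) off ∈ pvPosList target c := by
          rw [← pvPositions_getD]; exact (pvFirstGE_mem hbr.1).1
        obtain ⟨k, hk, hke, -⟩ := (mem_pvPosList target c _).1 hpl
        rw [pvErase_filter (target.length) rem _ (fun hm => absurd (hlt _ hm) (by omega))
            (by rw [PySem.List.mem_pyRange_one]; omega)]
        have hinv : ∀ x ∈ PySem.Set.add rem (pvFirstGE ((pvPositions target).getD c []) off),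
            x < pvFirstGE ((pvPositions target).getD c []) off + 1 := by
          intro x hx
          rw [PySem.Set.mem_add] at hx
          rcases hx with h | h
          · have := hlt x h; omega
          · omega
        exact ih (i0 + 1) _ _ _ rfl hinv (by omega)
      · simp only [if_neg hbr]
        exact ih (i0 + 1) ins rem off hins hlt hoff

-- ===== VERDICT (by name: the statement is the Claim_ definition above) =====
theorem get_semantic_role_groups_spec : Claim_equal_get_semantic_role_groups := by
  intro source target _
  unfold Spec_get_semantic_role_groups
  unfold get_semantic_role_groups get_semantic_role_groups_alt
  dsimp only
  have h1 := pvScan1 (pvLCS source target) (source.length) source 0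
    (PySem.List.pyRange 0 (source.length) 1) [] 0
    (List.filter_eq_self.mpr (fun a _ => by simp)).symm
    (by simp) (by omega) (by omega) (by simp)
  have h2 := pvScan2 target ((pvLCS source target).length) (pvLCS source target) 0
    (PySem.List.pyRange 0 (target.length) 1) [] 0
    (List.filter_eq_self.mpr (fun a _ => by simp)).symm
    (by simp) (by omega)
  rw [h1, h2]; rfl
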